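-- pv_equiv track=rewrite | github.com/eliottcassidy2000/math | 04-computation/full_ocf_spectral.py | find_all_directed_cycles
-- ===== SOURCE A (Python) =====
-- from itertools import combinations, permutations
-- from collections import defaultdict
--
-- def find_all_directed_cycles(p, S):
--     """Find ALL directed cycles in circulant tournament on Z_p.
--     Returns dict: length -> list of vertex frozensets."""
--     S_set = set(S)
--     adj = [[False] * p for _ in range(p)]
--     for i in range(p):
--         for j in range(p):
--             if i != j and (j - i) % p in S_set:
--                 adj[i][j] = True
--
--     cycles_by_len = defaultdict(list)
--
--     # For each odd k from 3 to p, find all directed k-cycles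
--     for k in range(3, p + 1, 2):
--         # Enumerate k-subsets
--         cycle_vsets = set()
--         for subset in combinations(range(p), k):
--             # Count directed Hamiltonian cycles on this k-vertex subtournament
--             for perm in permutations(subset):
--                 # Check if perm[0]->perm[1]->...->perm[k-1]->perm[0] is valid
--                 # Only consider cycles starting at min vertex to avoid counting rotations
--                 if perm[0] != min(subset):
--                     continue
--                 is_cycle = True
--                 for idx in range(k):
--                     if not adj[perm[idx]][perm[(idx + 1) % k]]:
--                         is_cycle = False
--                         break
--                 if is_cycle:
--                     cycle_vsets.add(frozenset(subset))
--                     break  # Found one direction, skip rest for this starting vertex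
--                     # Actually we should count ALL directed Hamiltonian cycles,
--                     # but each vertex set can support multiple (for k>3).
--                     # However, for Omega we only care about the VERTEX SET.
--
--         # For Omega, each cycle is identified by its vertex set
--         # But a vertex set can support MULTIPLE directed cycles (for k >= 5)!
--         # The conflict graph Omega has one vertex per DIRECTED CYCLE, not per vertex set.
--
--         # Let me recount properly: count directed cycles, identified uniquely
--         for subset in combinations(range(p), k):
--             # Find ALL directed Hamiltonian cycles on this subset
--             for perm in permutations(subset):
--                 if perm[0] != min(subset):
--                     continue
--                 is_cycle = True
--                 for idx in range(k):
--                     if not adj[perm[idx]][perm[(idx + 1) % k]]: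
--                         is_cycle = False
--                         break
--                 if is_cycle:
--                     # This directed cycle visits perm[0]->...->perm[k-1]->perm[0]
--                     # Canonical form: start at min, go in the direction
--                     cycle_vsets.add(frozenset(subset))
--                     # Note: for k=3, each 3-cycle vertex set has exactly 1 directed cycle
--                     # For k=5, a 5-vertex subtournament can have 0, 1, 2, or 3 directed 5-cycles
--
--         cycles_by_len[k] = list(cycle_vsets)
--
--     return cycles_by_len
-- ===== SOURCE B (Python) =====
-- from itertools import combinations
-- from collections import defaultdict
--
--
-- def _arc(step, p, u, v):
--     return u != v and step[(v - u) % p]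
--
--
-- def _has_ham_cycle(vs, step, p):
--     """Held-Karp bitmask DP (memoized, top-down): does the subtournament on the
--     sorted tuple vs carry a directed Hamiltonian cycle?  Anchor at vs[0];
--     reach(mask, e) = is there a path vs[0] -> ... -> rest[e] visiting exactly
--     the vertices {rest[i] : bit i of mask}?"""
--     rest = vs[1:]
--     n = len(rest)
--     memo = {}
--
--     def reach(mask, e):
--         if not (mask >> e) & 1:
--             return False
--         if mask == 1 << e:
--             return _arc(step, p, vs[0], rest[e])
--         key = (mask, e)
--         if key not in memo:
--             memo[key] = any(
--                 (mask >> f) & 1 and reach(mask ^ (1 << e), f)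
--                 for f in range(n)
--                 if f != e and _arc(step, p, rest[f], rest[e]))
--         return memo[key]
--
--     full = (1 << n) - 1
--     return any(reach(full, e) and _arc(step, p, rest[e], vs[0])
--                for e in range(n))
--
--
-- def find_all_directed_cycles(p, S):
--     """Find ALL directed cycles in circulant tournament on Z_p.
--     Returns dict: length -> list of vertex frozensets."""
--     allowed = set(S)
--     step = [d in allowed for d in range(p)]
--     cycles_by_len = defaultdict(list)
--     for k in range(3, p + 1, 2):
--         hits = set()
--         for subset in combinations(range(p), k):
--             if _has_ham_cycle(subset, step, p):
--                 hits.add(frozenset(subset))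
--         cycles_by_len[k] = list(hits)
--     return cycles_by_len
-- ===== Notes on version B (the rewrite author's own statement) =====
-- stated objective: alternative
-- what changed: B replaces A's two full passes that test every one of the k! permutations of each k-subset (over a p x p adjacency matrix) by one pass that decides each subset with a memoized Held-Karp bitmask DP (reach(mask,end) over 2^(k-1) masks) anchored at the subset's minimum vertex; the whole function still enumerates all k-subsets, so overall cost stays exponential in p.
import Mathlib
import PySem

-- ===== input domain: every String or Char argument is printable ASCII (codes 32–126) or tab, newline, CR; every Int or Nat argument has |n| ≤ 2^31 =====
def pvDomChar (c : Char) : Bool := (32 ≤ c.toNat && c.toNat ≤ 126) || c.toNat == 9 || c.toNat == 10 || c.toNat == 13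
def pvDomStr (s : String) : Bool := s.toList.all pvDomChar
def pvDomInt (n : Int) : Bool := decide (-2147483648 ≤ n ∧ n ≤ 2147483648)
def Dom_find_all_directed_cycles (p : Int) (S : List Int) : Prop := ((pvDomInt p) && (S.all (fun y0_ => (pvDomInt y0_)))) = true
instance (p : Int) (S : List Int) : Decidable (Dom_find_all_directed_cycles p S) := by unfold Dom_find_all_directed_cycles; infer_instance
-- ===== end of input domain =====

-- B replaces A's two k!-permutation passes per k-subset by a single pass deciding each subset
-- with a memoized Held-Karp bitmask DP (objective: alternative algorithm, same overall
-- exponential-in-p cost since both enumerate all k-subsets).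
--
-- Shared Python-semantics helpers (used by BOTH ports, like PySem): both Pythons return
-- 'list(s)' of a CPython set s of frozensets of small non-negative ints, whose order is
-- CPython's hash-table iteration order.  fsHash is CPython's frozenset hash
-- (Objects/setobject.c, frozenset_hash; hash(int)=int for 0 ≤ int < 2^61-1); pyProbe walks
-- CPython's probe sequence (LINEAR_PROBES=9, PERTURB_SHIFT=5) to the first free slot —
-- exact for DISTINCT keys (no duplicate adds, no deletes), which is how both ports feed it;
-- pySetBuild replays set_add_entry/set_table_resize over the distinct keys in
-- first-insertion order, and pySetList returns the resulting table-slot iteration order.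
def fsHash (xs : List Int) : UInt64 :=
  let h := xs.foldl (fun h e =>
    let x : UInt64 := UInt64.ofNat e.toNat
    h ^^^ (((x ^^^ (89869747 : UInt64)) ^^^ (x <<< 16)) * (3644798167 : UInt64))) (0 : UInt64)
  let h := h ^^^ ((UInt64.ofNat xs.length + 1) * 1927868237)
  let h := h ^^^ (h >>> 11) ^^^ (h >>> 25)
  let h := h * 69069 + 907133923
  if h == 0xFFFFFFFFFFFFFFFF then 590923713 else h

def pyProbe (t : Array (Option (List Int × UInt64))) (mask : Nat) : Nat → Nat → UInt64 → Nat
  | 0, i, _ => i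
  | fuel+1, i, perturb =>
    match (List.range' i (if i + 9 ≤ mask then 10 else 1)).find? (fun j => t[j]!.isNone) with
    | some j => j
    | none => pyProbe t mask fuel ((i * 5 + 1 + (perturb >>> 5).toNat) % (mask + 1)) (perturb >>> 5)

def pyIns (t : Array (Option (List Int × UInt64))) (kh : List Int × UInt64) : Array (Option (List Int × UInt64)) :=
  t.set! (pyProbe t (t.size - 1) (2 * t.size + 64) (kh.2.toNat % t.size) kh.2) (some kh)

def pyGrowSize : Nat → Nat → Nat → Nat
  | 0, newsize, _ => newsize
  | fuel + 1, newsize, minused => if newsize ≤ minused then pyGrowSize fuel (2 * newsize) minused else newsize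

def pySetBuild : List (List Int × UInt64) → Nat → Array (Option (List Int × UInt64)) → Array (Option (List Int × UInt64))
  | [], _, t => t
  | kh :: ks, used, t =>
    let t' := pyIns t kh
    let used' := used + 1
    if used' * 5 ≥ (t'.size - 1) * 3 then
      let minused := if used' > 50000 then used' * 2 else used' * 4
      pySetBuild ks used' ((t'.toList.filterMap id).foldl pyIns (Array.replicate (pyGrowSize 64 8 minused) none))
    else pySetBuild ks used' t'

-- list(s) for a CPython set s whose distinct keys were added in the order of `keys`
def pySetList (keys : List (List Int)) : List (List Int) :=
  (pySetBuild (keys.map (fun k => (k, fsHash k))) 0 (Array.replicate 8 none)).toList.filterMap (Option.map Prod.fst)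

-- itertools.combinations(xs, r), lexicographic order (both Pythons call it on range(p))
def pyCombinations : List Int → Nat → List (List Int)
  | _, 0 => [[]]
  | [], _ + 1 => []
  | x :: xs, r + 1 => (pyCombinations xs r).map (x :: ·) ++ pyCombinations xs (r + 1)

-- ===== PORT A =====
-- insertion-order record of the distinct keys a CPython set receives: s.add(frozenset(subset))
def listSetAdd (acc : List (List Int)) (key : List Int) : List (List Int) :=
  if key ∈ acc then acc else acc ++ [key]

-- adj[i][j] = i != j and (j - i) % p in S_set  (Python fills a p×p matrix cell by cell; the
-- final matrix holds exactly these values, built here by the same double range(p) traversal)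
def aAdj (Sset : List Int) (p : Int) : List (List Bool) :=
  (PySem.List.pyRange 0 p 1).map (fun i =>
    (PySem.List.pyRange 0 p 1).map (fun j =>
      decide (i ≠ j) && decide (PySem.Int.mod (j - i) p ∈ Sset)))

-- the inner 'for idx in range(k): if not adj[...]: is_cycle=False; break' check
def aCycleOK (adj : List (List Bool)) (perm : List Int) (k : Int) : Bool :=
  (PySem.List.pyRange 0 k 1).all (fun idx =>
    PySem.List.pyGetD
      (PySem.List.pyGetD adj (PySem.List.pyGetD perm idx 0) [])
      (PySem.List.pyGetD perm (PySem.Int.mod (idx + 1) k) 0) false)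

-- first permutation loop (with 'continue' on wrong head and 'break' after the first hit)
def aScanFirst (adj : List (List Bool)) (k minv : Int) : List (List Int) → Bool
  | [] => false
  | perm :: rest =>
    if PySem.List.pyGetD perm 0 0 ≠ minv then aScanFirst adj k minv rest
    else if aCycleOK adj perm k then true
    else aScanFirst adj k minv rest

def aPass1 (adj : List (List Bool)) (k : Int) (combos : List (List Int)) : List (List Int) :=
  combos.foldl (fun acc subset =>
    if aScanFirst adj k ((PySem.List.min? subset (fun x => x)).getD 0)
        (PySem.List.permutations subset subset.length)
    then listSetAdd acc subset else acc) []

def aPass2 (adj : List (List Bool)) (k : Int) (combos : List (List Int)) (s1 : List (List Int)) : List (List Int) :=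
  combos.foldl (fun acc subset =>
    (PySem.List.permutations subset subset.length).foldl (fun acc2 perm =>
      if (PySem.List.pyGetD perm 0 0 == (PySem.List.min? subset (fun x => x)).getD 0)
          && aCycleOK adj perm k
      then listSetAdd acc2 subset else acc2) acc) s1

def aPerK (adj : List (List Bool)) (p k : Int) : List (List Int) :=
  let combos := pyCombinations (PySem.List.pyRange 0 p 1) k.toNat
  pySetList (aPass2 adj k combos (aPass1 adj k combos))

def find_all_directed_cycles (p : Int) (S : List Int) : List (Int × List (List Int)) :=
  let Sset := PySem.Set.ofList S
  let adj := aAdj Sset p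
  (PySem.List.pyRange 3 (p + 1) 2).map (fun k => (k, aPerK adj p k))

-- ===== PORT B =====
-- _arc(step, p, u, v) = u != v and step[(v - u) % p]
def bArc (step : List Bool) (p u v : Int) : Bool :=
  decide (u ≠ v) && PySem.List.pyGetD step (PySem.Int.mod (v - u) p) false

-- termination of the DP recursion: clearing a set bit decreases the mask
theorem pv_xor_two_pow_lt {mask e : Nat} (h : (mask >>> e) % 2 = 1) : mask ^^^ (1 <<< e) < mask := by
  have h' : mask / 2 ^ e % 2 = 1 := by rwa [Nat.shiftRight_eq_div_pow] at h
  have ht : Nat.testBit mask e = true := by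
    rw [Nat.testBit_eq_decide_div_mod_eq]; simp [h']
  have h1 : (1 <<< e : Nat) = 2 ^ e := by rw [Nat.shiftLeft_eq, one_mul]
  rw [h1]
  apply Nat.lt_of_testBit e
  · rw [Nat.testBit_xor, ht, Nat.testBit_two_pow_self]; rfl
  · exact ht
  · intro j hj
    rw [Nat.testBit_xor, Nat.testBit_two_pow_of_ne (by omega)]
    simp

-- reach(mask, e): is there a path vs[0] -> ... -> rest[e] visiting exactly the vertices
-- {rest[i] : bit i of mask}?  (Source B memoizes this recursion; the memo only shares work and
-- does not change values, so the port is the same recursion.)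
def bReach (step : List Bool) (p v0 : Int) (rest : List Int) (mask e : Nat) : Bool :=
  if _h1 : (mask >>> e) % 2 ≠ 1 then false
  else if mask = 1 <<< e then bArc step p v0 (rest.getD e 0)
  else (List.range rest.length).any (fun f =>
    if decide (f ≠ e) && bArc step p (rest.getD f 0) (rest.getD e 0) then
      ((mask >>> f) % 2 == 1) && bReach step p v0 rest (mask ^^^ (1 <<< e)) f
    else false)
termination_by mask
decreasing_by exact pv_xor_two_pow_lt (by omega)

-- _has_ham_cycle(vs, step, p): rest = vs[1:], full = 2^len(rest) - 1
def bHasHam (vs : List Int) (step : List Bool) (p : Int) : Bool :=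
  let rest := vs.drop 1
  (List.range rest.length).any (fun e =>
    bReach step p (vs.getD 0 0) rest ((1 <<< rest.length) - 1) e &&
      bArc step p (rest.getD e 0) (vs.getD 0 0))

def find_all_directed_cycles_alt (p : Int) (S : List Int) : List (Int × List (List Int)) :=
  let allowed := PySem.Set.ofList S
  let step := (PySem.List.pyRange 0 p 1).map (fun d => decide (d ∈ allowed))
  (PySem.List.pyRange 3 (p + 1) 2).map (fun k =>
    (k, pySetList ((pyCombinations (PySem.List.pyRange 0 p 1) k.toNat).filter
      (fun subset => bHasHam subset step p))))

-- ===== PRECONDITION & SPEC =====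
def Spec_find_all_directed_cycles (p : Int) (S : List Int) (out : List (Int × List (List Int))) : Prop := out = find_all_directed_cycles_alt p S
instance (p : Int) (S : List Int) (out : List (Int × List (List Int))) : Decidable (Spec_find_all_directed_cycles p S out) := by unfold Spec_find_all_directed_cycles; infer_instance

-- ===== CLAIM (what is proved, stated in full; the proofs are below) =====
def Claim_equal_find_all_directed_cycles : Prop := ∀ (p : Int) (S : List Int), Dom_find_all_directed_cycles p S → Spec_find_all_directed_cycles p S (find_all_directed_cycles p S)

-- ===== LEMMAS AND PROOFS =====

-- proof-only helpers
def adjFn (adj : List (List Bool)) (a b : Int) : Bool :=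
  PySem.List.pyGetD (PySem.List.pyGetD adj a []) b false

def chainB (e : Int → Int → Bool) : Int → List Int → Bool
  | _, [] => true
  | c, v :: r => e c v && chainB e v r

-- "pm, read cyclically, is an e-cycle" (index form of A's check)
def cycP (e : Int → Int → Bool) (pm : List Int) : Prop :=
  (∀ i, i + 1 < pm.length → e (pm.getD i 0) (pm.getD (i+1) 0) = true) ∧
  e (pm.getD (pm.length - 1) 0) (pm.getD 0 0) = true

-- the decision both of A's passes make for one subset
def aDecide (adj : List (List Bool)) (k : Int) (subset : List Int) : Bool :=
  (PySem.List.permutations subset subset.length).any (fun pm =>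
    (PySem.List.pyGetD pm 0 0 == (PySem.List.min? subset (fun x => x)).getD 0)
      && aCycleOK adj pm k)

-- values of rest selected by a bitmask, in index order
def vals (rest : List Int) (mask : Nat) : List Int :=
  ((List.range rest.length).filter (fun i => Nat.testBit mask i)).map (fun i => rest.getD i 0)

-- ---- combinatorial structure lemmas ----

theorem pyCombinations_sublist {xs subset : List Int} {r : Nat}
    (h : subset ∈ pyCombinations xs r) : subset.Sublist xs := by
  induction xs generalizing subset r with
  | nil =>
    cases r with
    | zero => simp [pyCombinations] at h; simp [h]
    | succ r => simp [pyCombinations] at h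
  | cons x t ih =>
    cases r with
    | zero => simp [pyCombinations] at h; simp [h]
    | succ r =>
      simp only [pyCombinations, List.mem_append, List.mem_map] at h
      rcases h with ⟨q, hq, rfl⟩ | h
      · exact List.Sublist.cons₂ x (ih hq)
      · exact List.Sublist.cons x (ih h)

theorem pyCombinations_length {xs subset : List Int} {r : Nat}
    (h : subset ∈ pyCombinations xs r) : subset.length = r := by
  induction xs generalizing subset r with
  | nil =>
    cases r with
    | zero => simp [pyCombinations] at h; simp [h]
    | succ r => simp [pyCombinations] at h
  | cons x t ih =>
    cases r with
    | zero => simp [pyCombinations] at h; simp [h]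
    | succ r =>
      simp only [pyCombinations, List.mem_append, List.mem_map] at h
      rcases h with ⟨q, hq, rfl⟩ | h
      · simp [ih hq]
      · exact ih h

theorem pyCombinations_nodup {xs : List Int} (h : xs.Nodup) : ∀ r, (pyCombinations xs r).Nodup := by
  induction xs with
  | nil => intro r; cases r <;> simp [pyCombinations]
  | cons x t ih =>
    intro r
    cases r with
    | zero => simp [pyCombinations]
    | succ r =>
      rw [pyCombinations]
      apply List.Nodup.append
      · exact List.Nodup.map (fun a b hab => by simpa using congrArg List.tail hab) (ih h.of_cons r)
      · exact ih h.of_cons (r + 1)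
      · intro a ha hb
        obtain ⟨q, _, rfl⟩ := List.mem_map.mp ha
        have hx : x ∈ t := (pyCombinations_sublist hb).subset (by simp)
        exact (List.nodup_cons.mp h).1 hx

theorem idxOf?_of_mem (y : Int) (xs : List Int) (hy : y ∈ xs) :
    List.idxOf? y xs = some (List.idxOf y xs) := by
  rcases ho : List.idxOf? y xs with _ | i
  · exact absurd (List.idxOf?_eq_none_iff.mp ho) (by simp [hy])
  · congr 1
    have := List.idxOf_eq_getD_idxOf? y xs
    rw [ho] at this
    simp [this]

theorem mem_permutations_iff_perm (xs q : List Int) :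
    q ∈ PySem.List.permutations xs xs.length ↔ q.Perm xs := by
  constructor
  · exact PySem.List.perm_of_mem_permutations
  · intro hp
    induction q generalizing xs with
    | nil =>
      have : xs = [] := (List.Perm.nil_eq hp).symm
      subst this; simp [PySem.List.permutations_zero]
    | cons y q' ih =>
      have hlen : xs.length = q'.length + 1 := by
        have := hp.length_eq; simpa using this.symm
      rw [hlen, PySem.List.permutations_succ]
      have hy : y ∈ xs := hp.mem_iff.mp (by simp)
      have hidx : List.idxOf y xs < xs.length := List.idxOf_lt_length_of_mem hy
      refine List.mem_flatMap.mpr ⟨List.idxOf y xs, List.mem_range.mpr hidx, ?_⟩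
      have hget : xs[List.idxOf y xs]? = some y := by
        rw [List.getElem?_eq_getElem hidx, List.getElem_idxOf]
      rw [hget]
      simp only [List.mem_map]
      refine ⟨q', ?_, rfl⟩
      have herase : xs.eraseIdx (List.idxOf y xs) = xs.erase y := by
        rw [List.erase_eq_eraseIdx, idxOf?_of_mem y xs hy]
      have hq' : q'.Perm (xs.erase y) := (hp.trans (List.perm_cons_erase hy)).cons_inv
      rw [herase]
      have := ih (xs.erase y) hq'
      rwa [List.length_erase_of_mem hy, hlen] at this

-- ---- listSetAdd / fold lemmas ----

theorem listSetAdd_of_mem {acc : List (List Int)} {key : List Int} (h : key ∈ acc) :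
    listSetAdd acc key = acc := by simp [listSetAdd, h]

theorem mem_listSetAdd_self (acc : List (List Int)) (key : List Int) :
    key ∈ listSetAdd acc key := by
  by_cases h : key ∈ acc <;> simp [listSetAdd, h]

theorem foldl_addIf_id {P : List Int → Bool} {l : List (List Int)} {acc : List (List Int)}
    (h : ∀ x ∈ l, P x = true → x ∈ acc) :
    l.foldl (fun a s => if P s then listSetAdd a s else a) acc = acc := by
  induction l generalizing acc with
  | nil => rfl
  | cons s t ih =>
    simp only [List.foldl_cons]
    by_cases hs : P s = true
    · rw [if_pos hs, listSetAdd_of_mem (h s (by simp) hs)]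
      exact ih (fun x hx => h x (by simp [hx]))
    · rw [if_neg hs]
      exact ih (fun x hx => h x (by simp [hx]))

theorem foldl_addIf_eq_filter {P : List Int → Bool} :
    ∀ (l : List (List Int)) (acc : List (List Int)), l.Nodup → (∀ x ∈ l, x ∉ acc) →
      l.foldl (fun a s => if P s then listSetAdd a s else a) acc = acc ++ l.filter P := by
  intro l
  induction l with
  | nil => intro acc _ _; simp
  | cons s t ih =>
    intro acc hnd hdisj
    simp only [List.foldl_cons]
    by_cases hP : P s = true
    · rw [if_pos hP]
      have hs : s ∉ acc := hdisj s (by simp)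
      have hadd : listSetAdd acc s = acc ++ [s] := by simp [listSetAdd, hs]
      rw [hadd, ih (acc ++ [s]) hnd.of_cons (fun x hx => ?_), List.filter_cons_of_pos hP,
        List.append_assoc]
      · rfl
      · have hxs : x ≠ s := fun hh => (List.nodup_cons.mp hnd).1 (hh ▸ hx)
        simp [hdisj x (by simp [hx]), hxs]
    · rw [if_neg hP, ih acc hnd.of_cons (fun x hx => hdisj x (by simp [hx])),
        List.filter_cons_of_neg (by simpa using hP)]

theorem foldl_addIf_same {q : List Int → Bool} {s : List Int} (perms : List (List Int))
    (acc : List (List Int)) :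
    perms.foldl (fun a pm => if q pm then listSetAdd a s else a) acc
      = if perms.any q then listSetAdd acc s else acc := by
  induction perms generalizing acc with
  | nil => simp
  | cons pm t ih =>
    simp only [List.foldl_cons, List.any_cons]
    by_cases h : q pm = true
    · simp only [h, if_pos, Bool.true_or, ih]
      split
      · exact listSetAdd_of_mem (mem_listSetAdd_self acc s)
      · rfl
    · simp [h, ih]

theorem aScanFirst_eq_any (adj : List (List Bool)) (k minv : Int) (perms : List (List Int)) :
    aScanFirst adj k minv perms
      = perms.any (fun pm => (PySem.List.pyGetD pm 0 0 == minv) && aCycleOK adj pm k) := by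
  induction perms with
  | nil => rfl
  | cons pm t ih =>
    rw [aScanFirst, List.any_cons]
    by_cases h : PySem.List.pyGetD pm 0 0 = minv
    · rw [if_neg (by simp [h])]
      subst h
      by_cases hc : aCycleOK adj pm k <;> simp [hc, ih]
    · rw [if_pos h]
      simp [ih, beq_iff_eq, h]

-- ---- cycle structure lemmas ----

theorem cycleOK_iff (adj : List (List Bool)) (pm : List Int) (hne : 0 < pm.length) :
    aCycleOK adj pm (pm.length : Int) = true ↔ cycP (adjFn adj) pm := by
  set n := pm.length with hn
  have key : ∀ i : Nat, i < n →
      (PySem.List.pyGetD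
        (PySem.List.pyGetD adj (PySem.List.pyGetD pm (i : Int) 0) [])
        (PySem.List.pyGetD pm (PySem.Int.mod ((i : Int) + 1) (n : Int)) 0) false
        = adjFn adj (pm.getD i 0) (pm.getD ((i+1) % n) 0)) := by
    intro i hi
    have h1 : PySem.List.pyGetD pm (i : Int) 0 = pm.getD i 0 :=
      PySem.List.pyGetD_natCast ..
    have h2 : PySem.Int.mod ((i : Int) + 1) (n : Int) = (((i+1) % n : Nat) : Int) := by
      have : ((i : Int) + 1) = ((i + 1 : Nat) : Int) := by push_cast; ring
      rw [this, PySem.Int.mod_natCast]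
    have h3 : PySem.List.pyGetD pm (PySem.Int.mod ((i : Int) + 1) (n : Int)) 0
        = pm.getD ((i+1) % n) 0 := by
      rw [h2, PySem.List.pyGetD_natCast]
    rw [h1, h3, adjFn]
  rw [aCycleOK, List.all_eq_true]
  constructor
  · intro h
    have h' : ∀ i : Nat, i < n → adjFn adj (pm.getD i 0) (pm.getD ((i+1) % n) 0) = true := by
      intro i hi
      have hmem : (i : Int) ∈ PySem.List.pyRange 0 (n : Int) 1 := by
        rw [PySem.List.mem_pyRange_one]; omega
      have := h _ hmem
      rwa [key i hi] at this
    constructor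
    · intro i hi
      have := h' i (by omega)
      rwa [Nat.mod_eq_of_lt (by omega)] at this
    · have := h' (n-1) (by omega)
      rwa [Nat.sub_add_cancel (by omega), Nat.mod_self] at this
  · rintro ⟨h1, h2⟩ idx hmem
    rw [PySem.List.mem_pyRange_one] at hmem
    obtain ⟨hge, hlt⟩ := hmem
    obtain ⟨i, rfl⟩ : ∃ i : Nat, idx = (i : Int) := ⟨idx.toNat, by omega⟩
    have hin : i < n := by omega
    rw [key i hin]
    by_cases hc : i + 1 < n
    · rw [Nat.mod_eq_of_lt hc]; exact h1 i hc
    · have hieq : i = n - 1 := by omega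
      subst hieq
      rw [Nat.sub_add_cancel (by omega), Nat.mod_self]
      exact h2

theorem chainB_iff_getD (e : Int → Int → Bool) (c : Int) (t : List Int) :
    chainB e c t = true ↔
      ∀ i, i + 1 < (c :: t).length → e ((c :: t).getD i 0) ((c :: t).getD (i+1) 0) = true := by
  induction t generalizing c with
  | nil => simp [chainB]
  | cons v r ih =>
    rw [chainB, Bool.and_eq_true, ih]
    constructor
    · rintro ⟨h1, h2⟩ i hi
      cases i with
      | zero => simpa using h1
      | succ j =>
        have := h2 j (by simpa using hi)
        simpa using this
    · intro h
      refine ⟨by simpa using h 0 (by simp), fun i hi => ?_⟩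
      have := h (i+1) (by simpa using hi)
      simpa using this

theorem getD_last_cons (c : Int) (t : List Int) :
    (c :: t).getD ((c :: t).length - 1) 0 = t.getLastD c := by
  induction t generalizing c with
  | nil => simp
  | cons v r ih =>
    rw [List.getLastD_cons]
    have := ih v
    simpa using this

theorem cycP_cons_iff (e : Int → Int → Bool) (c : Int) (t : List Int) :
    cycP e (c :: t) ↔ (chainB e c t = true ∧ e (t.getLastD c) c = true) := by
  rw [cycP, chainB_iff_getD, getD_last_cons]
  simp

theorem cycP_congr {e1 e2 : Int → Int → Bool} {pm : List Int} (hne : pm ≠ [])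
    (h : ∀ a ∈ pm, ∀ b ∈ pm, e1 a b = e2 a b) : cycP e1 pm ↔ cycP e2 pm := by
  have hmem : ∀ i, i < pm.length → pm.getD i 0 ∈ pm := by
    intro i hi
    rw [List.getD_eq_getElem _ _ hi]
    exact List.getElem_mem hi
  have hlen : 0 < pm.length := List.length_pos_iff.mpr hne
  unfold cycP
  constructor <;> rintro ⟨h1, h2⟩ <;> refine ⟨fun i hi => ?_, ?_⟩
  · rw [← h _ (hmem i (by omega)) _ (hmem (i+1) hi)]; exact h1 i hi
  · rw [← h _ (hmem _ (by omega)) _ (hmem 0 (by omega))]; exact h2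
  · rw [h _ (hmem i (by omega)) _ (hmem (i+1) hi)]; exact h1 i hi
  · rw [h _ (hmem _ (by omega)) _ (hmem 0 (by omega))]; exact h2

theorem chainB_append_singleton (a : Int → Int → Bool) (c x : Int) (l : List Int) :
    chainB a c (l ++ [x]) = (chainB a c l && a (l.getLastD c) x) := by
  induction l generalizing c with
  | nil => simp [chainB]
  | cons v r ih =>
    rw [List.cons_append, chainB, ih v, chainB, List.getLastD_cons, Bool.and_assoc]

-- ---- the edge functions agree on [0, p) ----

theorem adjFn_eq_bArc (Sset : List Int) (p a b : Int)
    (ha : 0 ≤ a ∧ a < p) (hb : 0 ≤ b ∧ b < p) :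
    adjFn (aAdj Sset p) a b
      = bArc ((PySem.List.pyRange 0 p 1).map (fun d => decide (d ∈ Sset))) p a b := by
  have hp : (0 : Int) < p := by omega
  rw [adjFn, aAdj, PySem.List.pyGetD_map_pyRange_of_nonneg _ _ _ _ ha.1 ha.2,
      PySem.List.pyGetD_map_pyRange_of_nonneg _ _ _ _ hb.1 hb.2, bArc]
  have hm0 : 0 ≤ PySem.Int.mod (b - a) p := PySem.Int.mod_nonneg _ hp
  have hm1 : PySem.Int.mod (b - a) p < p := PySem.Int.mod_lt _ hp
  rw [PySem.List.pyGetD_map_pyRange_of_nonneg _ _ _ _ hm0 hm1]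

-- ---- A's per-subset decision characterised by value paths ----

theorem aDecide_iff (Sset : List Int) (p k : Int) (hk : 3 ≤ k)
    (subset : List Int) (hs : subset ∈ pyCombinations (PySem.List.pyRange 0 p 1) k.toNat) :
    ∀ (v : Int) (rest : List Int), subset = v :: rest →
      (aDecide (aAdj Sset p) k subset = true ↔
        ∃ q, q.Perm rest ∧
          chainB (bArc ((PySem.List.pyRange 0 p 1).map (fun d => decide (d ∈ Sset))) p) v q = true ∧
          bArc ((PySem.List.pyRange 0 p 1).map (fun d => decide (d ∈ Sset))) p (q.getLastD v) v = true) := by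
  rintro v rest rfl
  have hlen : (v :: rest).length = k.toNat := pyCombinations_length hs
  have hkk : (((v :: rest).length : Nat) : Int) = k := by rw [hlen]; omega
  have hsub : (v :: rest).Sublist (PySem.List.pyRange 0 p 1) := pyCombinations_sublist hs
  have hsorted : (v :: rest).Pairwise (· < ·) :=
    (PySem.List.pairwise_lt_pyRange_one 0 p).sublist hsub
  have hrange : ∀ x ∈ (v :: rest), 0 ≤ x ∧ x < p := by
    intro x hx
    have := hsub.mem hx
    rw [PySem.List.mem_pyRange_one] at this
    omega
  have hmin : (PySem.List.min? (v :: rest) (fun x => x)).getD 0 = v := by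
    rcases hm : PySem.List.min? (v :: rest) (fun x => x) with _ | m
    · rw [PySem.List.min?_eq_none_iff] at hm; simp at hm
    · have hmem := PySem.List.min?_mem hm
      have hle := PySem.List.min?_isMin hm v (by simp)
      rcases List.mem_cons.mp hmem with rfl | hmem'
      · rfl
      · have : v < m := (List.pairwise_cons.mp hsorted).1 m hmem'
        simp only [Option.getD_some]
        omega
  rw [aDecide, hmin, List.any_eq_true]
  constructor
  · rintro ⟨pm, hpm, hcond⟩
    have hperm : pm.Perm (v :: rest) := (mem_permutations_iff_perm _ pm).mp hpm
    rw [Bool.and_eq_true, beq_iff_eq] at hcond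
    obtain ⟨hhead, hcyc⟩ := hcond
    rcases pm with _ | ⟨c, t⟩
    · exact absurd hperm.length_eq (by simp)
    · have hc : c = v := by rwa [PySem.List.pyGetD_zero, List.getD_cons_zero] at hhead
      subst hc
      have hkpm : k = (((c :: t).length : Nat) : Int) := by
        rw [hperm.length_eq]; omega
      rw [hkpm] at hcyc
      have hcycP : cycP (adjFn (aAdj Sset p)) (c :: t) :=
        (cycleOK_iff _ _ (by simp)).mp hcyc
      have hcycP' : cycP (bArc ((PySem.List.pyRange 0 p 1).map (fun d => decide (d ∈ Sset))) p) (c :: t) :=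
        (cycP_congr (by simp) (fun a ha b hb =>
          adjFn_eq_bArc Sset p a b (hrange a (hperm.subset ha)) (hrange b (hperm.subset hb)))).mp hcycP
      rw [cycP_cons_iff] at hcycP'
      exact ⟨t, hperm.cons_inv, hcycP'.1, hcycP'.2⟩
  · rintro ⟨q, hq, hchain, hclose⟩
    refine ⟨v :: q, (mem_permutations_iff_perm _ _).mpr (hq.cons v), ?_⟩
    rw [Bool.and_eq_true, beq_iff_eq]
    refine ⟨by rw [PySem.List.pyGetD_zero, List.getD_cons_zero], ?_⟩
    have hkpm : k = (((v :: q).length : Nat) : Int) := by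
      have h1 := hq.length_eq
      simp only [List.length_cons] at hkk ⊢
      omega
    rw [hkpm]
    apply (cycleOK_iff _ _ (by simp)).mpr
    have hqmem : ∀ x ∈ (v :: q), x ∈ (v :: rest) := fun x hx => ((hq.cons v).subset hx)
    apply (cycP_congr (by simp) (fun a ha b hb =>
      adjFn_eq_bArc Sset p a b (hrange a (hqmem a ha)) (hrange b (hqmem b hb)))).mpr
    rw [cycP_cons_iff]
    exact ⟨hchain, hclose⟩

-- ---- bitmask lemmas ----

theorem testBit_iff_mod (m i : Nat) : Nat.testBit m i = true ↔ (m >>> i) % 2 = 1 := by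
  rw [Nat.testBit_eq_decide_div_mod_eq, Nat.shiftRight_eq_div_pow]
  simp

theorem testBit_xor_pow (mask e i : Nat) :
    Nat.testBit (mask ^^^ (1 <<< e)) i = if i = e then !Nat.testBit mask e else Nat.testBit mask i := by
  rw [Nat.shiftLeft_eq, one_mul, Nat.testBit_xor]
  by_cases h : i = e
  · subst h; rw [Nat.testBit_two_pow_self]; simp
  · rw [Nat.testBit_two_pow_of_ne (fun hh => h hh.symm)]; simp [h]

theorem mem_vals {rest : List Int} {mask : Nat} {x : Int} :
    x ∈ vals rest mask ↔ ∃ f, f < rest.length ∧ Nat.testBit mask f = true ∧ rest.getD f 0 = x := by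
  constructor
  · intro hx
    simp only [vals, List.mem_map, List.mem_filter, List.mem_range] at hx
    obtain ⟨f, ⟨hf, hb⟩, hx⟩ := hx
    exact ⟨f, hf, hb, hx⟩
  · rintro ⟨f, hf, hb, hx⟩
    simp only [vals, List.mem_map, List.mem_filter, List.mem_range]
    exact ⟨f, ⟨hf, hb⟩, hx⟩

theorem vals_perm_cons {rest : List Int} {mask : Nat} {e : Nat} (he : e < rest.length)
    (hb : Nat.testBit mask e = true) :
    (vals rest mask).Perm (rest.getD e 0 :: vals rest (mask ^^^ (1 <<< e))) := by
  obtain ⟨l₁, l₂, hsplit⟩ := List.append_of_mem (List.mem_range.mpr he)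
  have hnd : (l₁ ++ e :: l₂).Nodup := hsplit ▸ List.nodup_range
  have hem : e ∉ l₁ ++ l₂ := (List.nodup_cons.mp (List.nodup_middle.mp hnd)).1
  have he1 : e ∉ l₁ := fun h => hem (List.mem_append.mpr (Or.inl h))
  have he2 : e ∉ l₂ := fun h => hem (List.mem_append.mpr (Or.inr h))
  have hP'e : Nat.testBit (mask ^^^ (1 <<< e)) e = false := by
    rw [testBit_xor_pow]; simp [hb]
  have hcongr : ∀ l : List Nat, e ∉ l →
      l.filter (fun i => Nat.testBit (mask ^^^ (1 <<< e)) i)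
        = l.filter (fun i => Nat.testBit mask i) := by
    intro l hel
    apply List.filter_congr
    intro x hx
    rw [testBit_xor_pow, if_neg (fun (hh : x = e) => hel (hh ▸ hx))]
  unfold vals
  rw [hsplit, List.filter_append, List.filter_append,
      List.filter_cons_of_pos hb, List.filter_cons_of_neg (by simpa using hP'e),
      hcongr l₁ he1, hcongr l₂ he2, List.map_append, List.map_cons, List.map_append]
  exact List.perm_middle

theorem map_getD_range (rest : List Int) :
    (List.range rest.length).map (fun i => rest.getD i 0) = rest := by
  apply List.ext_getElem (by simp)
  intro i h1 h2
  simp only [List.getElem_map, List.getElem_range]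
  rw [List.getD_eq_getElem _ _ (by simpa using h2)]

theorem vals_full (rest : List Int) : vals rest ((1 <<< rest.length) - 1) = rest := by
  unfold vals
  rw [List.filter_eq_self.mpr, map_getD_range]
  intro a ha
  rw [Nat.shiftLeft_eq, one_mul, Nat.testBit_two_pow_sub_one]
  simpa using List.mem_range.mp ha

theorem vals_single {rest : List Int} {e : Nat} (he : e < rest.length) :
    vals rest (1 <<< e) = [rest.getD e 0] := by
  unfold vals
  have hp : (fun i => Nat.testBit (1 <<< e) i) = fun i => decide (i = e) := by
    funext i
    rw [Nat.shiftLeft_eq, one_mul]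
    by_cases h : i = e
    · subst h; simp [Nat.testBit_two_pow_self]
    · simp [Nat.testBit_two_pow_of_ne (fun hh => h hh.symm), h]
  rw [hp, List.filter_eq, List.count_eq_one_of_mem List.nodup_range (List.mem_range.mpr he)]
  rfl

theorem getD_inj {rest : List Int} (hnd : rest.Nodup) {f e : Nat} (hf : f < rest.length)
    (he : e < rest.length) (h : rest.getD f 0 = rest.getD e 0) : f = e := by
  rw [List.getD_eq_getElem _ _ hf, List.getD_eq_getElem _ _ he] at h
  exact (List.Nodup.getElem_inj_iff hnd).mp h

theorem mask_eq_single {rest : List Int} {mask e : Nat}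
    (hm : mask < 2 ^ rest.length) (he : e < rest.length) (hb : Nat.testBit mask e = true)
    (hlen : (vals rest mask).length = 1) : mask = 1 <<< e := by
  have hfl : ((List.range rest.length).filter (fun i => Nat.testBit mask i)).length = 1 := by
    simpa [vals] using hlen
  have hemem : e ∈ (List.range rest.length).filter (fun i => Nat.testBit mask i) :=
    List.mem_filter.mpr ⟨List.mem_range.mpr he, hb⟩
  have hfeq : (List.range rest.length).filter (fun i => Nat.testBit mask i) = [e] := by
    rcases hl : (List.range rest.length).filter (fun i => Nat.testBit mask i) with _ | ⟨a, t⟩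
    · rw [hl] at hemem; cases hemem
    · rw [hl] at hfl hemem
      have ht : t = [] := by simpa using hfl
      subst ht
      have := List.mem_singleton.mp hemem
      simp [this]
  rw [Nat.shiftLeft_eq, one_mul]
  apply Nat.eq_of_testBit_eq
  intro j
  by_cases hj : j < rest.length
  · have hiff : Nat.testBit mask j = true ↔ j = e := by
      constructor
      · intro hbj
        have : j ∈ [e] := hfeq ▸ List.mem_filter.mpr ⟨List.mem_range.mpr hj, hbj⟩
        simpa using this
      · rintro rfl; exact hb
    by_cases hje : j = e
    · subst hje; simp [hiff.mpr rfl, Nat.testBit_two_pow_self]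
    · have hbf : Nat.testBit mask j = false := by
        cases hx : Nat.testBit mask j
        · rfl
        · exact absurd (hiff.mp hx) hje
      rw [hbf, Nat.testBit_two_pow_of_ne (fun hh => hje hh.symm)]
  · have h1 : Nat.testBit mask j = false :=
      Nat.testBit_lt_two_pow (lt_of_lt_of_le hm (Nat.pow_le_pow_right (by norm_num) (by omega)))
    rw [h1, Nat.testBit_two_pow_of_ne (by omega)]

theorem bReach_iff (step : List Bool) (p v0 : Int) (rest : List Int) (hnd : rest.Nodup) :
    ∀ mask, mask < 2 ^ rest.length → ∀ e, e < rest.length →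
      (bReach step p v0 rest mask e = true ↔
        ∃ q, (q ++ [rest.getD e 0]).Perm (vals rest mask) ∧
          chainB (bArc step p) v0 (q ++ [rest.getD e 0]) = true) := by
  intro mask
  induction mask using Nat.strong_induction_on with
  | _ mask ih =>
  intro hm e he
  rw [bReach]
  by_cases hbit : (mask >>> e) % 2 ≠ 1
  · rw [dif_pos hbit]
    constructor
    · intro h; exact Bool.noConfusion h
    · rintro ⟨q, hperm, _⟩
      have hxmem : rest.getD e 0 ∈ vals rest mask := hperm.subset (by simp)
      obtain ⟨f, hf, hbf, hfe⟩ := mem_vals.mp hxmem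
      have hfeq : f = e := getD_inj hnd hf he hfe
      subst hfeq
      exact absurd ((testBit_iff_mod mask f).mp hbf) hbit
  · rw [dif_neg hbit]
    rw [not_not] at hbit
    have hbe : Nat.testBit mask e = true := (testBit_iff_mod mask e).mpr hbit
    by_cases hbase : mask = 1 <<< e
    · rw [if_pos hbase]
      subst hbase
      constructor
      · intro harc
        refine ⟨[], ?_, ?_⟩
        · simp [vals_single he]
        · simpa [chainB] using harc
      · rintro ⟨q, hperm, hchain⟩
        rw [vals_single he] at hperm
        have hq : q = [] := by
          have := hperm.length_eq
          simp at this
          simpa using this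
        subst hq
        simpa [chainB] using hchain
    · rw [if_neg hbase]
      have hlt : mask ^^^ (1 <<< e) < mask := pv_xor_two_pow_lt hbit
      have hm' : mask ^^^ (1 <<< e) < 2 ^ rest.length := lt_trans hlt hm
      have hpc : (vals rest mask).Perm (rest.getD e 0 :: vals rest (mask ^^^ (1 <<< e))) :=
        vals_perm_cons he hbe
      rw [List.any_eq_true]
      constructor
      · rintro ⟨f, hfmem, hcond⟩
        have hf : f < rest.length := List.mem_range.mp hfmem
        by_cases hif : (decide (f ≠ e) && bArc step p (rest.getD f 0) (rest.getD e 0)) = true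
        · rw [if_pos hif] at hcond
          rw [Bool.and_eq_true] at hcond hif
          obtain ⟨hbfm, hrec⟩ := hcond
          obtain ⟨hfe', harc⟩ := hif
          obtain ⟨q'', hperm'', hchain''⟩ := (ih _ hlt hm' f hf).mp hrec
          refine ⟨q'' ++ [rest.getD f 0], ?_, ?_⟩
          · exact ((List.perm_append_singleton _ _).trans
              ((hperm''.cons _).trans hpc.symm))
          · rw [chainB_append_singleton, hchain'', List.getLastD_concat]
            simpa using harc
        · rw [if_neg hif] at hcond
          exact Bool.noConfusion hcond
      · rintro ⟨q, hperm, hchain⟩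
        have hqne : q ≠ [] := by
          rintro rfl
          have hl1 : (vals rest mask).length = 1 := by
            have := hperm.length_eq
            simpa using this.symm
          exact hbase (mask_eq_single hm he hbe hl1)
        obtain ⟨q'', x, rfl⟩ : ∃ q'' x, q = q'' ++ [x] := by
          rcases List.eq_nil_or_concat q with h | ⟨q'', x, h⟩
          · exact absurd h hqne
          · exact ⟨q'', x, by simpa [List.concat_eq_append] using h⟩
        have hqperm : (q'' ++ [x]).Perm (vals rest (mask ^^^ (1 <<< e))) := by
          have h1 : (rest.getD e 0 :: (q'' ++ [x])).Perm
              (rest.getD e 0 :: vals rest (mask ^^^ (1 <<< e))) :=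
            ((List.perm_append_singleton _ _).symm.trans hperm).trans hpc
          exact h1.cons_inv
        have hxmem : x ∈ vals rest (mask ^^^ (1 <<< e)) := hqperm.subset (by simp)
        obtain ⟨f, hf, hbf', hfx⟩ := mem_vals.mp hxmem
        have hfe : f ≠ e := by
          intro hh
          rw [hh, testBit_xor_pow] at hbf'
          simp [hbe] at hbf'
        rw [chainB_append_singleton, Bool.and_eq_true, List.getLastD_concat] at hchain
        obtain ⟨hchain', harc⟩ := hchain
        have hrec : bReach step p v0 rest (mask ^^^ (1 <<< e)) f = true := by
          apply (ih _ hlt hm' f hf).mpr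
          exact ⟨q'', by rw [hfx]; exact hqperm, by rw [hfx]; exact hchain'⟩
        refine ⟨f, List.mem_range.mpr hf, ?_⟩
        rw [if_pos (by rw [Bool.and_eq_true]; exact ⟨by simpa using hfe, by rw [hfx]; exact harc⟩)]
        rw [Bool.and_eq_true]
        constructor
        · have hbmf : Nat.testBit mask f = true := by
            have h := testBit_xor_pow mask e f
            rw [if_neg hfe] at h
            rw [← h]; exact hbf'
          simpa using (testBit_iff_mod mask f).mp hbmf
        · exact hrec

theorem bHasHam_iff (step : List Bool) (p : Int) (v : Int) (rest : List Int)
    (hnd : rest.Nodup) (hn : 1 ≤ rest.length) :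
    (bHasHam (v :: rest) step p = true ↔
      ∃ q, q.Perm rest ∧ chainB (bArc step p) v q = true ∧
        bArc step p (q.getLastD v) v = true) := by
  have h2pos : 0 < 2 ^ rest.length := Nat.two_pow_pos _
  have hfull_lt : (1 <<< rest.length) - 1 < 2 ^ rest.length := by
    rw [Nat.shiftLeft_eq, one_mul]
    omega
  unfold bHasHam
  simp only [List.drop_succ_cons, List.drop_zero, List.getD_cons_zero]
  rw [List.any_eq_true]
  constructor
  · rintro ⟨e, hemem, hcond⟩
    have he : e < rest.length := List.mem_range.mp hemem
    rw [Bool.and_eq_true] at hcond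
    obtain ⟨hre, harc⟩ := hcond
    obtain ⟨q', hperm, hchain⟩ := (bReach_iff step p v rest hnd _ hfull_lt e he).mp hre
    rw [vals_full] at hperm
    exact ⟨q' ++ [rest.getD e 0], hperm, hchain, by rw [List.getLastD_concat]; exact harc⟩
  · rintro ⟨q, hperm, hchain, hclose⟩
    have hqne : q ≠ [] := by
      rintro rfl
      have := hperm.length_eq
      simp at this
      omega
    obtain ⟨q'', x, rfl⟩ : ∃ q'' x, q = q'' ++ [x] := by
      rcases List.eq_nil_or_concat q with h | ⟨q'', x, h⟩
      · exact absurd h hqne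
      · exact ⟨q'', x, by simpa [List.concat_eq_append] using h⟩
    have hx : x ∈ rest := hperm.subset (by simp)
    have he : List.idxOf x rest < rest.length := List.idxOf_lt_length_of_mem hx
    have hgd : rest.getD (List.idxOf x rest) 0 = x := by
      rw [List.getD_eq_getElem _ _ he, List.getElem_idxOf]
    refine ⟨List.idxOf x rest, List.mem_range.mpr he, ?_⟩
    rw [Bool.and_eq_true]
    rw [List.getLastD_concat] at hclose
    constructor
    · apply (bReach_iff step p v rest hnd _ hfull_lt _ he).mpr
      refine ⟨q'', ?_, ?_⟩
      · rw [vals_full, hgd]; exact hperm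
      · rw [hgd]; exact hchain
    · rw [hgd]; exact hclose

theorem aPerK_eq_filter (Sset : List Int) (p k : Int) :
    aPerK (aAdj Sset p) p k
      = pySetList ((pyCombinations (PySem.List.pyRange 0 p 1) k.toNat).filter
          (fun s => aDecide (aAdj Sset p) k s)) := by
  simp only [aPerK]
  congr 1
  set adj := aAdj Sset p with hadj
  set combos := pyCombinations (PySem.List.pyRange 0 p 1) k.toNat with hcombos
  set P := aDecide adj k with hP
  have hcnd : combos.Nodup := by
    rw [hcombos]
    exact pyCombinations_nodup
      ((PySem.List.pairwise_lt_pyRange_one 0 p).imp (fun h => ne_of_lt h)) _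
  have h1 : aPass1 adj k combos
      = combos.foldl (fun a s => if P s then listSetAdd a s else a) [] := by
    rw [aPass1]
    refine PySem.List.foldl_congr_mem _ _ _ _ (fun acc x _ => ?_)
    rw [aScanFirst_eq_any, hP, aDecide]
  have h1' : aPass1 adj k combos = combos.filter P := by
    rw [h1, foldl_addIf_eq_filter combos [] hcnd (by simp)]
    simp
  have h2 : aPass2 adj k combos (aPass1 adj k combos)
      = combos.foldl (fun a s => if P s then listSetAdd a s else a) (aPass1 adj k combos) := by
    rw [aPass2]
    refine PySem.List.foldl_congr_mem _ _ _ _ (fun acc x _ => ?_)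
    rw [foldl_addIf_same, hP, aDecide]
  rw [h2, h1']
  apply foldl_addIf_id
  intro x hx hPx
  exact List.mem_filter.mpr ⟨hx, hPx⟩

theorem perK_eq (S : List Int) (p k : Int) (hk : 3 ≤ k) :
    aPerK (aAdj (PySem.Set.ofList S) p) p k
      = pySetList ((pyCombinations (PySem.List.pyRange 0 p 1) k.toNat).filter
          (fun subset => bHasHam subset
            ((PySem.List.pyRange 0 p 1).map (fun d => decide (d ∈ PySem.Set.ofList S))) p)) := by
  rw [aPerK_eq_filter (PySem.Set.ofList S) p k]
  congr 1
  apply List.filter_congr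
  intro subset hs
  have hlen := pyCombinations_length hs
  have hsub := pyCombinations_sublist hs
  have hsorted : subset.Pairwise (· < ·) :=
    (PySem.List.pairwise_lt_pyRange_one 0 p).sublist hsub
  rcases subset with _ | ⟨v, rest⟩
  · exfalso
    simp at hlen
    omega
  · have hnd : rest.Nodup := hsorted.of_cons.imp (fun h => ne_of_lt h)
    have hrl : 1 ≤ rest.length := by
      simp at hlen
      omega
    have h1 := aDecide_iff (PySem.Set.ofList S) p k hk _ hs v rest rfl
    have h2 := bHasHam_iff
      ((PySem.List.pyRange 0 p 1).map (fun d => decide (d ∈ PySem.Set.ofList S))) p v rest hnd hrl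
    exact Bool.eq_iff_iff.mpr (h1.trans h2.symm)

-- ===== VERDICT (by name: the statement is the Claim_ definition above) =====
theorem find_all_directed_cycles_spec : Claim_equal_find_all_directed_cycles := by
  intro p S _
  unfold Spec_find_all_directed_cycles
  simp only [find_all_directed_cycles, find_all_directed_cycles_alt]
  refine List.map_congr_left (fun k hk => ?_)
  have h3 : 3 ≤ k := ((PySem.List.mem_pyRange_iff_of_pos (by norm_num) k).mp hk).1
  exact congrArg (fun v => (k, v)) (perK_eq S p k h3)
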